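-- pv_equiv track=rewrite | github.com/ZProLegend007/AppleTVRemote-GUI | applergui/ui/main_window.py | _parse_atvremote_scan_output
-- ===== SOURCE A (Python) =====
-- def _parse_atvremote_scan_output(output):
--     """PROPERLY parse atvremote scan output"""
--     devices = []
--
--     if not output or not output.strip():
--         return devices
--
--     # atvremote scan output format:
--     # Name: Apple TV
--     # Model: Apple TV 4K
--     # Address: 192.168.1.100
--     # Identifier: XXXX-XXXX-XXXX
--     # ----
--
--     current_device = {}
--     for line in output.strip().split('\n'):
--         line = line.strip()
--
--         if line == '----' or line == '':
--             if current_device: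
--                 # Convert to expected format
--                 device_info = {
--                     "name": current_device.get('Name', 'Unknown Apple TV'),
--                     "model": current_device.get('Model', 'Apple TV'),
--                     "address": current_device.get('Address', 'Unknown'),
--                     "identifier": current_device.get('Identifier', 'Unknown'),
--                     "device": None
--                 }
--                 devices.append(device_info)
--                 current_device = {}
--         elif ':' in line:
--             key, value = line.split(':', 1)
--             current_device[key.strip()] = value.strip()
--
--     # Add last device if exists
--     if current_device:
--         device_info = {
--             "name": current_device.get('Name', 'Unknown Apple TV'),
--             "model": current_device.get('Model', 'Apple TV'),
--             "address": current_device.get('Address', 'Unknown'),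
--             "identifier": current_device.get('Identifier', 'Unknown'),
--             "device": None
--         }
--         devices.append(device_info)
--
--     return devices
-- ===== SOURCE B (Python) =====
-- def _parse_atvremote_scan_output(output):
--     """Parse atvremote scan output: split into separator-delimited blocks, map each to a device dict."""
--     if not output or not output.strip():
--         return []
--     lines = [l.strip() for l in output.strip().split('\n')]
--     n = len(lines)
--     devices = []
--     i = 0
--     while i < n:
--         if lines[i] in ('', '----'):
--             i += 1
--             continue
--         j = i
--         fields = {}
--         while j < n and lines[j] not in ('', '----'):
--             if ':' in lines[j]:
--                 key, value = lines[j].split(':', 1)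
--                 fields[key.strip()] = value.strip()
--             j += 1
--         if fields:
--             devices.append({
--                 "name": fields.get('Name', 'Unknown Apple TV'),
--                 "model": fields.get('Model', 'Apple TV'),
--                 "address": fields.get('Address', 'Unknown'),
--                 "identifier": fields.get('Identifier', 'Unknown'),
--                 "device": None,
--             })
--         i = j
--     return devices
-- ===== Notes on version B (the rewrite author's own statement) =====
-- stated objective: simpler
-- what changed: Replaced A's stateful flush-on-separator loop (with the device-conversion code duplicated for the trailing block) by a two-pointer scan that partitions the stripped lines into separator-delimited blocks and maps each block to its device dict once.
import Mathlib
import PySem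

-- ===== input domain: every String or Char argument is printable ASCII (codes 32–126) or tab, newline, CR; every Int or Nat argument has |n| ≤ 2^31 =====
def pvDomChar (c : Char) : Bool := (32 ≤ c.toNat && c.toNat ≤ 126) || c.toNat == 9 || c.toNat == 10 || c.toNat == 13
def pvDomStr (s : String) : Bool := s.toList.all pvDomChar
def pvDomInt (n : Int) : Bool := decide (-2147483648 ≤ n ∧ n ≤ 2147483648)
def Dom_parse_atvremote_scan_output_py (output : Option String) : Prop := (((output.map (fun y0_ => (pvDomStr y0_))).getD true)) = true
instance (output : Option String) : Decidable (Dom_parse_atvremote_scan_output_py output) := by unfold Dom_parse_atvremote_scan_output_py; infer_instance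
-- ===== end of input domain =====

-- B replaces A's flush-on-separator loop (with its duplicated tail conversion) by a
-- block-partitioning scan: simpler decomposition, same O(n) cost, same return value.

-- shared by both Pythons: the device_info dict literal built from the collected fields
def pvConv (d : PySem.Dict String String) : List (String × Option String) :=
  [("name", some (d.getD "Name" "Unknown Apple TV")),
   ("model", some (d.getD "Model" "Apple TV")),
   ("address", some (d.getD "Address" "Unknown")),
   ("identifier", some (d.getD "Identifier" "Unknown")),
   ("device", none)]

-- ===== PORT A =====
-- the body of A's for-loop: strip the line, flush on separator, else record 'key: value'
def pvStepA (st : List (List (String × Option String)) × PySem.Dict String String)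
    (rawLine : String) : List (List (String × Option String)) × PySem.Dict String String :=
  let line := PySem.Str.strip rawLine
  if line = "----" ∨ line = "" then
    if st.2.items.isEmpty then st
    else (st.1 ++ [pvConv st.2], PySem.Dict.empty)
  else if PySem.Str.isIn ":" line then
    match PySem.Str.splitMax? line ":" 1 with
    | some [key, value] => (st.1, st.2.insert (PySem.Str.strip key) (PySem.Str.strip value))
    | _ => st     -- unreachable: ':' in line means split(':', 1) yields exactly two pieces
  else st

def parse_atvremote_scan_output_py (output : Option String) :
    List (List (String × Option String)) :=
  match output with
  | none => []
  | some o =>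
    if o = "" ∨ PySem.Str.strip o = "" then []
    else
      let st := ((PySem.Str.split? (PySem.Str.strip o) "\n").getD []).foldl pvStepA
                  ([], PySem.Dict.empty)
      if st.2.items.isEmpty then st.1 else st.1 ++ [pvConv st.2]

-- ===== PORT B =====
-- B works on pre-stripped lines; a separator is '' or '----'
def pvIsSep (l : String) : Bool := l == "" || l == "----"

-- B's inner while loop body: the fields dict collected from one block's 'key: value' lines
def pvUpd (d : PySem.Dict String String) (l : String) : PySem.Dict String String :=
  if PySem.Str.isIn ":" l then
    match PySem.Str.splitMax? l ":" 1 with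
    | some [key, value] => d.insert (PySem.Str.strip key) (PySem.Str.strip value)
    | _ => d
  else d

def pvFields (block : List String) : PySem.Dict String String :=
  block.foldl pvUpd PySem.Dict.empty

-- B's outer while loop: skip separators, otherwise take the maximal separator-free block
def pvScanB : List String → List (List (String × Option String))
  | [] => []
  | l :: ls =>
    if pvIsSep l then pvScanB ls
    else
      let block := l :: ls.takeWhile (fun x => !pvIsSep x)
      let rest := ls.dropWhile (fun x => !pvIsSep x)
      let d := pvFields block
      (if d.items.isEmpty then [] else [pvConv d]) ++ pvScanB rest
  termination_by ls => ls.length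
  decreasing_by
    all_goals
      have := List.length_dropWhile_le (fun x => !pvIsSep x) ls
      simp only [List.length_cons]
      omega

def parse_atvremote_scan_output_py_alt (output : Option String) :
    List (List (String × Option String)) :=
  match output with
  | none => []
  | some o =>
    if o = "" ∨ PySem.Str.strip o = "" then []
    else pvScanB (((PySem.Str.split? (PySem.Str.strip o) "\n").getD []).map PySem.Str.strip)

-- ===== PRECONDITION & SPEC =====
def Spec_parse_atvremote_scan_output_py (output : Option String) (out : List (List (String × Option String))) : Prop := out = parse_atvremote_scan_output_py_alt output
instance (output : Option String) (out : List (List (String × Option String))) : Decidable (Spec_parse_atvremote_scan_output_py output out) := by unfold Spec_parse_atvremote_scan_output_py; infer_instance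

-- ===== CLAIM (what is proved, stated in full; the proofs are below) =====
def Claim_equal_parse_atvremote_scan_output_py : Prop := ∀ (output : Option String), Dom_parse_atvremote_scan_output_py output → Spec_parse_atvremote_scan_output_py output (parse_atvremote_scan_output_py output)

-- ===== LEMMAS AND PROOFS =====

-- A's step on a stripped line (pvStepA = pvStepS ∘ strip, definitionally)
def pvStepS (st : List (List (String × Option String)) × PySem.Dict String String)
    (line : String) : List (List (String × Option String)) × PySem.Dict String String :=
  if line = "----" ∨ line = "" then
    if st.2.items.isEmpty then st
    else (st.1 ++ [pvConv st.2], PySem.Dict.empty)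
  else if PySem.Str.isIn ":" line then
    match PySem.Str.splitMax? line ":" 1 with
    | some [key, value] => (st.1, st.2.insert (PySem.Str.strip key) (PySem.Str.strip value))
    | _ => st
  else st

theorem pvStepA_eq (st : List (List (String × Option String)) × PySem.Dict String String)
    (r : String) : pvStepA st r = pvStepS st (PySem.Str.strip r) := rfl

theorem pvStepS_nonsep (st : List (List (String × Option String)) × PySem.Dict String String)
    (l : String) (h : ¬ (l = "----" ∨ l = "")) : pvStepS st l = (st.1, pvUpd st.2 l) := by
  simp only [pvStepS, pvUpd, if_neg h]
  cases hm : PySem.Str.splitMax? l ":" 1 with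
  | none => split <;> rfl
  | some parts =>
    cases parts with
    | nil => split <;> rfl
    | cons k rest =>
      cases rest with
      | nil => split <;> rfl
      | cons v rest2 =>
        cases rest2 with
        | nil => split <;> rfl
        | cons _ _ => split <;> rfl

-- the rest of A's loop from a partial state, plus the final flush
def pvRun (d : PySem.Dict String String) : List String → List (List (String × Option String))
  | [] => if d.items.isEmpty then [] else [pvConv d]
  | l :: ls =>
    if pvIsSep l then
      (if d.items.isEmpty then pvRun d ls else pvConv d :: pvRun PySem.Dict.empty ls)
    else pvRun (pvUpd d l) ls

theorem pvIsSep_iff (l : String) : pvIsSep l = true ↔ (l = "----" ∨ l = "") := by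
  simp [pvIsSep]; tauto

theorem pvRun_eq_fold (ls : List String) :
    ∀ (acc : List (List (String × Option String))) (d : PySem.Dict String String),
    (let st := ls.foldl pvStepS (acc, d)
     if st.2.items.isEmpty then st.1 else st.1 ++ [pvConv st.2]) = acc ++ pvRun d ls := by
  induction ls with
  | nil => intro acc d; simp [pvRun]; split_ifs <;> simp
  | cons l ls ih =>
    intro acc d
    simp only [List.foldl_cons, pvRun]
    by_cases hs : pvIsSep l = true
    · rw [if_pos hs]
      have hs' := (pvIsSep_iff l).mp hs
      by_cases he : d.items.isEmpty
      · simp only [pvStepS, if_pos hs', ih acc d, if_pos he]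
      · simp only [pvStepS, if_pos hs', if_neg he]
        rw [ih]
        simp
    · rw [if_neg hs]
      have hs' : ¬ (l = "----" ∨ l = "") := fun h => hs ((pvIsSep_iff l).mpr h)
      rw [pvStepS_nonsep (acc, d) l hs']
      exact ih acc (pvUpd d l)

theorem pvRun_nonsep_prefix (t : List String) :
    ∀ (d : PySem.Dict String String) (rest : List String),
    (∀ x ∈ t, pvIsSep x = false) →
    pvRun d (t ++ rest) = pvRun (t.foldl pvUpd d) rest := by
  induction t with
  | nil => intro d rest _; rfl
  | cons x t ih =>
    intro d rest h
    have hx : pvIsSep x = false := h x (List.mem_cons_self)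
    simp only [List.cons_append, pvRun, hx, Bool.false_eq_true, if_false, List.foldl_cons]
    exact ih (pvUpd d x) rest (fun y hy => h y (List.mem_cons_of_mem x hy))

theorem dict_empty_of_isEmpty (d : PySem.Dict String String)
    (h : d.items.isEmpty = true) : d = PySem.Dict.empty := by
  apply PySem.Dict.ext
  simpa [List.isEmpty_iff] using h

theorem pvDropWhile_head_false {α : Type} (p : α → Bool) :
    ∀ (l : List α) (r : α) (rest : List α), l.dropWhile p = r :: rest → p r = false := by
  intro l
  induction l with
  | nil => intro r rest h; simp at h
  | cons x xs ih =>
    intro r rest h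
    rw [List.dropWhile_cons] at h
    by_cases hp : p x = true
    · rw [if_pos hp] at h
      exact ih r rest h
    · rw [if_neg hp] at h
      cases h
      simpa using hp

theorem pvRun_empty_eq_scan (ls : List String) :
    pvRun PySem.Dict.empty ls = pvScanB ls := by
  induction ls using pvScanB.induct with
  | case1 => simp [pvRun, pvScanB, PySem.Dict.empty]
  | case2 l ls hs ih =>
    rw [pvScanB, if_pos hs, pvRun, if_pos hs]
    simpa [PySem.Dict.empty] using ih
  | case3 l ls hs rest ih =>
    have ih' : pvRun PySem.Dict.empty (ls.dropWhile (fun x => !pvIsSep x))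
        = pvScanB (ls.dropWhile (fun x => !pvIsSep x)) := ih
    rw [pvScanB, if_neg hs]
    dsimp only
    rw [pvRun, if_neg (by simpa using hs)]
    have hsplit : ls = ls.takeWhile (fun x => !pvIsSep x) ++ ls.dropWhile (fun x => !pvIsSep x) :=
      (List.takeWhile_append_dropWhile).symm
    have htake : ∀ x ∈ ls.takeWhile (fun x => !pvIsSep x), pvIsSep x = false := by
      intro x hx
      simpa using List.mem_takeWhile_imp hx
    conv_lhs => rw [hsplit]
    rw [show pvUpd PySem.Dict.empty l = [l].foldl pvUpd PySem.Dict.empty from rfl]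
    rw [pvRun_nonsep_prefix _ _ _ htake]
    have hfd : (ls.takeWhile (fun x => !pvIsSep x)).foldl pvUpd ([l].foldl pvUpd PySem.Dict.empty)
        = pvFields (l :: ls.takeWhile (fun x => !pvIsSep x)) := by
      simp [pvFields]
    rw [hfd]
    set d := pvFields (l :: ls.takeWhile (fun x => !pvIsSep x)) with hd
    rcases hcase : ls.dropWhile (fun x => !pvIsSep x) with _ | ⟨r, rest'⟩
    · rw [pvRun]
      simp only [pvScanB]
      split_ifs <;> simp
    · have hrsep : pvIsSep r = true := by
        have := pvDropWhile_head_false (fun x => !pvIsSep x) ls r rest' hcase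
        simpa using this
      rw [hcase] at ih'
      have hscan : pvScanB (r :: rest') = pvScanB rest' := by
        rw [pvScanB, if_pos hrsep]
      have ih2 : pvRun PySem.Dict.empty rest' = pvScanB rest' := by
        have h0 : pvRun PySem.Dict.empty (r :: rest') = pvRun PySem.Dict.empty rest' := by
          rw [pvRun, if_pos hrsep]
          simp [PySem.Dict.empty]
        rw [← h0, ih', hscan]
      rw [pvRun, if_pos hrsep, hscan]
      by_cases he : d.items.isEmpty
      · rw [if_pos he, dict_empty_of_isEmpty d he, ih2]
        simp [PySem.Dict.empty]
      · rw [if_neg he, if_neg he, ih2]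
        simp

-- ===== VERDICT (by name: the statement is the Claim_ definition above) =====
theorem parse_atvremote_scan_output_py_spec : Claim_equal_parse_atvremote_scan_output_py := by
  intro output _
  unfold Spec_parse_atvremote_scan_output_py
  unfold parse_atvremote_scan_output_py parse_atvremote_scan_output_py_alt
  cases output with
  | none => rfl
  | some o =>
    by_cases h : o = "" ∨ PySem.Str.strip o = ""
    · simp [h]
    · simp only [if_neg h]
      have hfold : ((PySem.Str.split? (PySem.Str.strip o) "\n").getD []).foldl pvStepA
            ([], PySem.Dict.empty)
          = (((PySem.Str.split? (PySem.Str.strip o) "\n").getD []).map PySem.Str.strip).foldl pvStepS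
            ([], PySem.Dict.empty) := by
        rw [List.foldl_map]
        exact PySem.List.foldl_congr_mem _ _ _ _ (fun st r _ => pvStepA_eq st r)
      rw [hfold]
      have := pvRun_eq_fold (((PySem.Str.split? (PySem.Str.strip o) "\n").getD []).map PySem.Str.strip)
        [] PySem.Dict.empty
      simp only [List.nil_append] at this
      rw [this, pvRun_empty_eq_scan]
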